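-- pv_equiv track=rewrite | github.com/Perebeinis25/python_helper | home_work/hw_4_1_task_4.py | placeholder_format
-- ===== SOURCE A (Python) =====
-- def placeholder_format(format_str, value):
--     indx_str = 0
--     indx_value = 0
--     str_res = ""
--
--     while indx_str + 1 <= len(format_str):
--
--         if format_str[indx_str] != '{':
--             str_res += format_str[indx_str]
--             indx_str += 1
--
--         else:
--             indx_str += 1
--
--             if indx_str == len(format_str):
--                 str_res += format_str[indx_str - 1]
--                 return str_res
--
--             elif format_str[indx_str] == '}':
--                 str_res += str(value[indx_value])
--                 indx_value += 1
--                 indx_str += 1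
--
--                 if indx_value == len(value):
--                     str_res += format_str[indx_str:]
--                     return str_res
--
--             else:
--                 str_res += format_str[indx_str - 1]
--
--     return str_res
-- ===== SOURCE B (Python) =====
-- def placeholder_format(format_str, value):
--     parts = format_str.split('{}')
--     res = [parts[0]]
--     idx = 0
--     for i in range(1, len(parts)):
--         res.append(str(value[idx]))
--         idx += 1
--         if idx == len(value):
--             res.append('{}'.join(parts[i:]))
--             return ''.join(res)
--         res.append(parts[i])
--     return ''.join(res)
-- ===== Notes on version B (the rewrite author's own statement) =====
-- stated objective: faster
-- what changed: Replaces the character-by-character state machine (manual index, brace lookahead, per-char string append) with a single split on the literal '{}' placeholder followed by interleaving the values, re-gluing the untouched tail with '{}'.join when values run out; bulk C-level split/join instead of per-character Python bytecode.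
import Mathlib
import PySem

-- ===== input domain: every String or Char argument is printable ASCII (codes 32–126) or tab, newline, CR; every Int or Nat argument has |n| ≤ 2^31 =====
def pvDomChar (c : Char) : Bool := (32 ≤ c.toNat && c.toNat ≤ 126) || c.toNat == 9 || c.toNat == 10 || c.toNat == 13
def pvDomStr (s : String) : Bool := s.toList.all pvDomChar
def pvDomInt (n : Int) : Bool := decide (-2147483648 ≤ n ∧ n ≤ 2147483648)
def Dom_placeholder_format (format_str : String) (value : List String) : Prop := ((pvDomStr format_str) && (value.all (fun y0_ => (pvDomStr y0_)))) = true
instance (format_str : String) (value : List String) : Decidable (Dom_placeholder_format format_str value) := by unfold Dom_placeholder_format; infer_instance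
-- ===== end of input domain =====

-- B replaces A's character-by-character state machine by split-on-'{}' plus interleaving the values; equal return value on Pre_.

-- ===== PORT A =====
-- A's while loop over indx_str/indx_value/str_res: the remaining characters stand for
-- format_str[indx_str:], the remaining list vals for value[indx_value:], acc for str_res.
def pfGo : List Char → List String → List Char → List Char
  | [], _, acc => acc
  | c :: cs, vals, acc =>
    if c ≠ '{' then pfGo cs vals (acc ++ [c])
    else
      match cs with
      | [] => acc ++ ['{']                         -- indx_str == len(format_str): append '{' and return
      | d :: cs' =>
        if d = '}' then
          match vals with
          | [] => []                               -- Python raises IndexError (value[indx_value]); excluded by Pre_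
          | v :: vrest =>
            if vrest = [] then acc ++ v.toList ++ cs'   -- indx_value == len(value): dump format_str[indx_str:]
            else pfGo cs' vrest (acc ++ v.toList)
        else pfGo (d :: cs') vals (acc ++ ['{'])   -- lone '{': append it, rescan from the next char
  termination_by cs _ _ => cs.length
  decreasing_by all_goals (simp only [List.length_cons]; omega)

def placeholder_format (format_str : String) (value : List String) : String :=
  String.ofList (pfGo format_str.toList value [])

-- ===== PORT B =====
-- Source B's for-loop over parts[1:] and the remaining values; acc is ''.join(res) so far.
def pfAltGo : List (List Char) → List String → List Char → List Char
  | [], _, acc => acc                              -- loop ended: more values than placeholders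
  | _ :: _, [], _ => []                            -- Python raises IndexError (value[idx]); excluded by Pre_
  | p :: ps, v :: vrest, acc =>
    if vrest = [] then acc ++ v.toList ++ PySem.Chars.join ['{', '}'] (p :: ps)   -- '{}'.join(parts[i:])
    else pfAltGo ps vrest (acc ++ v.toList ++ p)

def placeholder_format_alt (format_str : String) (value : List String) : String :=
  match PySem.Chars.splitOn format_str.toList ['{', '}'] with   -- format_str.split('{}')
  | [] => ""                                       -- unreachable: split is never empty
  | p0 :: ps => String.ofList (pfAltGo ps value p0)

-- ===== PRECONDITION & SPEC =====
-- Pre_ excludes exactly the inputs where A (and B) raise IndexError: an empty value list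
-- while format_str contains the placeholder '{}'.
def Pre_placeholder_format (format_str : String) (value : List String) : Prop :=
  value ≠ [] ∨ PySem.Str.isIn "{}" format_str = false
instance (format_str : String) (value : List String) : Decidable (Pre_placeholder_format format_str value) := by unfold Pre_placeholder_format; infer_instance
def pvWitness_placeholder_format : String × List String := ("a{}b{}c", ["x", "y"])

def Spec_placeholder_format (format_str : String) (value : List String) (out : String) : Prop := out = placeholder_format_alt format_str value
instance (format_str : String) (value : List String) (out : String) : Decidable (Spec_placeholder_format format_str value out) := by unfold Spec_placeholder_format; infer_instance

-- ===== CLAIM (what is proved, stated in full; the proofs are below) =====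
def Claim_equal_placeholder_format : Prop := ∀ (format_str : String) (value : List String), Dom_placeholder_format format_str value → Pre_placeholder_format format_str value → Spec_placeholder_format format_str value (placeholder_format format_str value)

-- ===== LEMMAS AND PROOFS =====

-- Proof-side model of format_str.split('{}'): leftmost, non-overlapping.
def mySplit : List Char → List (List Char)
  | [] => [[]]
  | c :: rest =>
    if c = '{' ∧ rest.head? = some '}' then [] :: mySplit rest.tail
    else
      match mySplit rest with
      | [] => [[c]]
      | p :: ps => (c :: p) :: ps
  termination_by cs => cs.length
  decreasing_by all_goals (simp [List.length_tail]; try omega)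

lemma mySplit_ne_nil (cs : List Char) : mySplit cs ≠ [] := by
  rw [mySplit.eq_def]
  split
  · simp
  · split
    · simp
    · split <;> simp

lemma mySplit_nil : mySplit [] = [[]] := by simp [mySplit]

lemma mySplit_ph (rest : List Char) : mySplit ('{' :: '}' :: rest) = [] :: mySplit rest := by
  rw [mySplit]; simp

lemma mySplit_cons (c : Char) (rest : List Char)
    (h : ¬ (c = '{' ∧ rest.head? = some '}')) :
    mySplit (c :: rest) =
      (c :: (mySplit rest).headI) :: (mySplit rest).tail := by
  rw [mySplit]
  simp only [if_neg h]
  rcases h' : mySplit rest with _ | ⟨p, ps⟩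
  · exact absurd h' (mySplit_ne_nil rest)
  · simp

-- split followed by '{}'.join is the identity
lemma join_mySplit_aux (n : Nat) : ∀ (cs : List Char), cs.length ≤ n →
    PySem.Chars.join ['{', '}'] (mySplit cs) = cs := by
  induction n with
  | zero =>
    intro cs hc
    have : cs = [] := by cases cs <;> simp_all
    subst this; simp [mySplit_nil, PySem.Chars.join_singleton]
  | succ n ih =>
    intro cs hc
    rcases cs with _ | ⟨c, rest⟩
    · simp [mySplit_nil, PySem.Chars.join_singleton]
    · by_cases h : c = '{' ∧ rest.head? = some '}'
      · obtain ⟨rfl, hh⟩ := h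
        rcases rest with _ | ⟨d, t⟩
        · simp at hh
        · simp only [List.head?_cons, Option.some.injEq] at hh
          subst hh
          rw [mySplit_ph]
          rcases h' : mySplit t with _ | ⟨p, ps⟩
          · exact absurd h' (mySplit_ne_nil t)
          · rw [PySem.Chars.join_cons_cons]
            have := ih t (by simp at hc; omega)
            rw [h'] at this
            rw [this]; rfl
      · rw [mySplit_cons c rest h]
        have hrest := ih rest (by simp at hc; omega)
        rcases h' : mySplit rest with _ | ⟨p, ps⟩
        · exact absurd h' (mySplit_ne_nil rest)
        · rw [h'] at hrest
          simp only [List.headI_cons, List.tail_cons]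
          rcases ps with _ | ⟨q, qs⟩
          · rw [PySem.Chars.join_singleton] at hrest ⊢
            rw [← hrest]
          · rw [PySem.Chars.join_cons_cons] at hrest ⊢
            rw [← hrest]; rfl

lemma join_mySplit (cs : List Char) : PySem.Chars.join ['{', '}'] (mySplit cs) = cs :=
  join_mySplit_aux cs.length cs le_rfl

-- splitOn computes mySplit
lemma splitOn_go_eq (fuel : Nat) : ∀ (l cur : List Char) (acc : List (List Char)),
    l.length < fuel →
    PySem.Chars.splitOn.go ['{', '}'] fuel l cur acc =
      acc.reverse ++ (cur.reverse ++ (mySplit l).headI) :: (mySplit l).tail := by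
  induction fuel with
  | zero => intro l cur acc hf; omega
  | succ fuel ih =>
    intro l cur acc hf
    cases l with
    | nil => simp [PySem.Chars.splitOn.go, mySplit_nil]
    | cons c rest =>
      rw [PySem.Chars.splitOn.go]
      by_cases hp : List.isPrefixOf ['{', '}'] (c :: rest) = true
      · rw [if_pos hp]
        rcases rest with _ | ⟨d, t⟩
        · simp [List.isPrefixOf] at hp
        · have hcd : c = '{' ∧ d = '}' := by
            simp [List.isPrefixOf] at hp
            exact ⟨hp.1.symm, hp.2.symm⟩
          obtain ⟨rfl, rfl⟩ := hcd
          simp only [List.length_cons, List.length_nil, List.drop_succ_cons, List.drop_zero]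
          simp only [List.length_cons] at hf
          rw [ih t [] (cur.reverse :: acc) (by omega)]
          rw [mySplit_ph]
          rcases h' : mySplit t with _ | ⟨p, ps⟩
          · exact absurd h' (mySplit_ne_nil t)
          · simp
      · rw [if_neg hp]
        simp only [List.length_cons] at hf
        rw [ih rest (c :: cur) acc (by omega)]
        have hcr : ¬ (c = '{' ∧ rest.head? = some '}') := by
          rintro ⟨rfl, hh⟩
          apply hp
          rcases rest with _ | ⟨d, t⟩
          · simp at hh
          · simp only [List.head?_cons, Option.some.injEq] at hh
            subst hh
            simp [List.isPrefixOf]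
        rw [mySplit_cons c rest hcr]
        simp

lemma splitOn_eq_mySplit (cs : List Char) :
    PySem.Chars.splitOn cs ['{', '}'] = mySplit cs := by
  show PySem.Chars.splitOn.go _ (cs.length + 1) cs [] [] = _
  rw [splitOn_go_eq (cs.length + 1) cs [] [] (by omega)]
  rcases h' : mySplit cs with _ | ⟨p, ps⟩
  · exact absurd h' (mySplit_ne_nil cs)
  · simp

-- the two loops compute the same list of characters
lemma go_eq_aux (n : Nat) : ∀ (cs : List Char), cs.length ≤ n →
    ∀ (vals : List String) (acc : List Char),
    pfGo cs vals acc = pfAltGo (mySplit cs).tail vals (acc ++ (mySplit cs).headI) := by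
  induction n with
  | zero =>
    intro cs hc vals acc
    have : cs = [] := by cases cs <;> simp_all
    subst this; simp [pfGo, mySplit_nil, pfAltGo]
  | succ n ih =>
    intro cs hc vals acc
    rcases cs with _ | ⟨c, rest⟩
    · simp [pfGo, mySplit_nil, pfAltGo]
    · by_cases h : c = '{' ∧ rest.head? = some '}'
      · obtain ⟨rfl, hh⟩ := h
        rcases rest with _ | ⟨d, t⟩
        · simp at hh
        · simp only [List.head?_cons, Option.some.injEq] at hh
          subst hh
          rw [mySplit_ph]
          simp only [List.tail_cons, List.headI_cons, List.append_nil]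
          rcases h' : mySplit t with _ | ⟨p, ps⟩
          · exact absurd h' (mySplit_ne_nil t)
          · rcases vals with _ | ⟨v, vrest⟩
            · simp [pfGo, pfAltGo]
            · rcases vrest with _ | ⟨w, ws⟩
              · have hj : PySem.Chars.join ['{', '}'] (p :: ps) = t := by
                  rw [← h']; exact join_mySplit t
                simp [pfGo, pfAltGo, hj]
              · have hlhs : pfGo ('{' :: '}' :: t) (v :: w :: ws) acc
                    = pfGo t (w :: ws) (acc ++ v.toList) := by
                  simp [pfGo]
                rw [hlhs, ih t (by simp at hc; omega) (w :: ws) (acc ++ v.toList), h']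
                simp [pfAltGo]
      · rw [mySplit_cons c rest h]
        have hlhs : pfGo (c :: rest) vals acc = pfGo rest vals (acc ++ [c]) := by
          by_cases hc' : c = '{'
          · subst hc'
            rcases rest with _ | ⟨d, t⟩
            · simp [pfGo]
            · have hd : d ≠ '}' := by
                intro rfl_; apply h; exact ⟨rfl, by simp [rfl_]⟩
              rw [pfGo.eq_def]; simp [hd]
          · rw [pfGo.eq_def]; simp [hc']
        rw [hlhs, ih rest (by simp at hc; omega) vals (acc ++ [c])]
        simp

lemma go_eq (cs : List Char) (vals : List String) (acc : List Char) :
    pfGo cs vals acc = pfAltGo (mySplit cs).tail vals (acc ++ (mySplit cs).headI) :=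
  go_eq_aux cs.length cs le_rfl vals acc

-- ===== VERDICT (by name: the statement is the Claim_ definition above) =====
theorem placeholder_format_spec : Claim_equal_placeholder_format := by
  intro fs value _ _
  show placeholder_format fs value = placeholder_format_alt fs value
  unfold placeholder_format placeholder_format_alt
  rw [splitOn_eq_mySplit]
  rcases h' : mySplit fs.toList with _ | ⟨p, ps⟩
  · exact absurd h' (mySplit_ne_nil fs.toList)
  · rw [go_eq fs.toList value [], h']
    simp
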